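-- pv_equiv track=rewrite | github.com/afourtassi/VAP-child | mono_to_stereo.py | find_speech_overlaps
-- ===== SOURCE A (Python) =====
-- def find_speech_overlaps(timestamps_dic):
--     # Return a list of tuple with every overlaps in a dict of timestamps
--     overlaps_list = []
--
--     dict_keys = list(timestamps_dic.keys())
--     for speaker1 in range(len(dict_keys)-1): # Don't compare the last speaker, useless
--         for speaker2 in range(speaker1 +1, len(dict_keys)):
--             for i in range(len(timestamps_dic[dict_keys[speaker1]])):
--                 start1, end1 = timestamps_dic[dict_keys[speaker1]][i]
--                 for j in range(len(timestamps_dic[dict_keys[speaker2]])):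
--                     start2, end2 = timestamps_dic[dict_keys[speaker2]][j]
--
--                     # Check for overlap:
--                     if start1 < end2 and start2 < end1:
--                         overlaps_list.append(((dict_keys[speaker1], i), (dict_keys[speaker2], j)))
--     return overlaps_list
-- ===== SOURCE B (Python) =====
-- def find_speech_overlaps(timestamps_dic):
--     # Per speaker pair: scan speaker2's intervals in start order, stopping as soon
--     # as starts reach end1; then sort the hit indices to restore A's output order.
--     keys = list(timestamps_dic.keys())
--     out = []
--     for a, k1 in enumerate(keys):
--         for k2 in keys[a + 1:]:
--             iv1 = timestamps_dic[k1]
--             iv2 = timestamps_dic[k2]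
--             order2 = sorted(enumerate(iv2), key=lambda e: e[1][0])
--             for i, (s1, e1) in enumerate(iv1):
--                 js = []
--                 for j, (s2, e2) in order2:
--                     if s2 >= e1:
--                         break
--                     if e2 > s1:
--                         js.append(j)
--                 js.sort()
--                 out.extend(((k1, i), (k2, j)) for j in js)
--     return out
-- ===== Notes on version B (the rewrite author's own statement) =====
-- stated objective: alternative
-- what changed: B replaces A's innermost brute-force scan of speaker2's intervals by a per-pair pass over those intervals pre-sorted by start time with an early stop once starts reach end1, then sorts the hit indices to restore A's output order.
import Mathlib
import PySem

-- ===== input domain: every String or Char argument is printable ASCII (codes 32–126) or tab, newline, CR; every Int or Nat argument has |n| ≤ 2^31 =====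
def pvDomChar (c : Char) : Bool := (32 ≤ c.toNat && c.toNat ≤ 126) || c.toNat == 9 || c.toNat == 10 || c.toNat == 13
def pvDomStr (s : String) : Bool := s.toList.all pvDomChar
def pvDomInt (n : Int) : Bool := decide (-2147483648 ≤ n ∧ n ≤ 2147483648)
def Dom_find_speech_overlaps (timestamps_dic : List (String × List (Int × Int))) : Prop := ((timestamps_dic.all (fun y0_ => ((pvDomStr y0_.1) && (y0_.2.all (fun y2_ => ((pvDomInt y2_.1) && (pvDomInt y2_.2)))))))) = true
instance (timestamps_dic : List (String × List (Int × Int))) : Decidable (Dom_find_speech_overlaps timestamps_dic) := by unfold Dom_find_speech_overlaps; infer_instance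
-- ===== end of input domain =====

-- B replaces A's innermost brute-force j-scan by a per-pair scan of speaker2's
-- intervals in ascending start order with an early stop, sorting hit indices to
-- restore A's order (objective: alternative traversal; return value only).

-- ===== PORT A =====
def find_speech_overlaps (timestamps_dic : List (String × List (Int × Int))) : List ((String × Int) × (String × Int)) :=
  let d := PySem.Dict.mk timestamps_dic
  let dict_keys := d.keys
  (PySem.List.pyRange 0 (PySem.List.len dict_keys - 1) 1).foldl (fun acc speaker1 =>
    (PySem.List.pyRange (speaker1 + 1) (PySem.List.len dict_keys) 1).foldl (fun acc speaker2 =>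
      let iv1 := d.getD (PySem.List.pyGetD dict_keys speaker1 "") []
      (PySem.List.pyRange 0 (PySem.List.len iv1) 1).foldl (fun acc i =>
        let p1 := PySem.List.pyGetD iv1 i (0, 0)
        let iv2 := d.getD (PySem.List.pyGetD dict_keys speaker2 "") []
        (PySem.List.pyRange 0 (PySem.List.len iv2) 1).foldl (fun acc j =>
          let p2 := PySem.List.pyGetD iv2 j (0, 0)
          if p1.1 < p2.2 ∧ p2.1 < p1.2 then
            acc ++ [((PySem.List.pyGetD dict_keys speaker1 "", i), (PySem.List.pyGetD dict_keys speaker2 "", j))]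
          else acc) acc) acc) acc) []

-- ===== PORT B =====
-- the 'for j, (s2, e2) in order2: if s2 >= e1: break …' loop of Source B
def pvScan : List (Int × (Int × Int)) → Int → Int → List Int → List Int
  | [], _, _, js => js
  | e :: rest, s1, e1, js =>
    if e.2.1 ≥ e1 then js
    else pvScan rest s1 e1 (if e.2.2 > s1 then js ++ [e.1] else js)

def find_speech_overlaps_alt (timestamps_dic : List (String × List (Int × Int))) : List ((String × Int) × (String × Int)) :=
  let d := PySem.Dict.mk timestamps_dic
  let keys := d.keys
  (PySem.List.enumerate keys 0).foldl (fun out ak =>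
    (PySem.List.slice keys (some (ak.1 + 1)) none).foldl (fun out k2 =>
      let iv1 := d.getD ak.2 []
      let iv2 := d.getD k2 []
      let order2 := PySem.List.sorted (PySem.List.enumerate iv2 0) (fun e => e.2.1) false
      (PySem.List.enumerate iv1 0).foldl (fun out ie =>
        let js := PySem.List.sorted (pvScan order2 ie.2.1 ie.2.2 []) (fun x => x) false
        out ++ js.map (fun j => ((ak.2, ie.1), (k2, j)))) out) out) []

-- ===== PRECONDITION & SPEC =====
def Spec_find_speech_overlaps (timestamps_dic : List (String × List (Int × Int))) (out : List ((String × Int) × (String × Int))) : Prop := out = find_speech_overlaps_alt timestamps_dic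
instance (timestamps_dic : List (String × List (Int × Int))) (out : List ((String × Int) × (String × Int))) : Decidable (Spec_find_speech_overlaps timestamps_dic out) := by unfold Spec_find_speech_overlaps; infer_instance

-- ===== CLAIM (what is proved, stated in full; the proofs are below) =====
def Claim_equal_find_speech_overlaps : Prop := ∀ (timestamps_dic : List (String × List (Int × Int))), Dom_find_speech_overlaps timestamps_dic → Spec_find_speech_overlaps timestamps_dic (find_speech_overlaps timestamps_dic)

-- ===== LEMMAS AND PROOFS =====

theorem pvScan_spec (L : List (Int × (Int × Int))) (s1 e1 : Int) (js : List Int) :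
    pvScan L s1 e1 js
      = js ++ ((L.takeWhile (fun e => decide (e.2.1 < e1))).filter (fun e => decide (s1 < e.2.2))).map (·.1) := by
  induction L generalizing js with
  | nil => simp [pvScan]
  | cons e rest ih =>
    by_cases h : e.2.1 ≥ e1
    · simp [pvScan, h, show ¬ e.2.1 < e1 by omega]
    · have h' : e.2.1 < e1 := by omega
      by_cases h2 : e.2.2 > s1
      · simp [pvScan, h, h', h2, ih]
      · simp [pvScan, h, h', h2, ih, show ¬ s1 < e.2.2 by omega]

theorem pvTakeWhile_eq_filter (c : Int) (L : List (Int × (Int × Int)))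
    (h : L.Pairwise fun a b => a.2.1 ≤ b.2.1) :
    L.takeWhile (fun e => decide (e.2.1 < c)) = L.filter (fun e => decide (e.2.1 < c)) := by
  induction L with
  | nil => rfl
  | cons x t ih =>
    rcases List.pairwise_cons.mp h with ⟨hx, ht⟩
    by_cases hk : x.2.1 < c
    · simp [List.takeWhile_cons, List.filter_cons, hk, ih ht]
    · have h1 : List.takeWhile (fun e => decide (e.2.1 < c)) (x :: t) = [] := by
        simp [List.takeWhile_cons, hk]
      have h2 : List.filter (fun e => decide (e.2.1 < c)) (x :: t) = [] := by
        rw [List.filter_eq_nil_iff]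
        intro a ha
        simp only [decide_eq_true_eq]
        rcases List.mem_cons.mp ha with rfl | ha'
        · omega
        · have := hx a ha'; omega
      rw [h1, h2]

theorem pvRowA (iv2 : List (Int × Int)) (s1 e1 : Int) (k1 k2 : String) (i : Int) (acc : List ((String × Int) × (String × Int))) :
    (PySem.List.pyRange 0 (PySem.List.len iv2) 1).foldl (fun acc j =>
        let p2 := PySem.List.pyGetD iv2 j (0, 0)
        if s1 < p2.2 ∧ p2.1 < e1 then acc ++ [((k1, i), (k2, j))] else acc) acc
      = acc ++ ((PySem.List.enumerate iv2 0).filter (fun e => decide (s1 < e.2.2 ∧ e.2.1 < e1))).map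
          (fun e => ((k1, i), (k2, e.1))) := by
  rw [PySem.List.foldl_append_ite
        (p := fun j => s1 < (PySem.List.pyGetD iv2 j (0, 0)).2 ∧ (PySem.List.pyGetD iv2 j (0, 0)).1 < e1)
        (f := fun j => ((k1, i), (k2, j)))]
  rw [PySem.List.enumerate_eq_map_pyRange iv2 (0, 0)]
  rw [List.filter_map, List.map_map]
  rfl

theorem pvRowB (iv2 : List (Int × Int)) (s1 e1 : Int) :
    PySem.List.sorted (pvScan (PySem.List.sorted (PySem.List.enumerate iv2 0) (fun e => e.2.1) false) s1 e1 [])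
        (fun x => x) false
      = ((PySem.List.enumerate iv2 0).filter (fun e => decide (s1 < e.2.2 ∧ e.2.1 < e1))).map (·.1) := by
  have hpw := PySem.List.sorted_pairwise (PySem.List.enumerate iv2 0) (fun e => e.2.1)
  rw [pvScan_spec, pvTakeWhile_eq_filter e1 _ hpw]
  rw [List.filter_filter, List.nil_append]
  have hfe : (fun (e : Int × (Int × Int)) => decide (s1 < e.2.2) && decide (e.2.1 < e1))
      = (fun e => decide (s1 < e.2.2 ∧ e.2.1 < e1)) := by
    funext e
    by_cases h1 : e.2.1 < e1 <;> by_cases h2 : s1 < e.2.2 <;> simp [h1, h2]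
  rw [hfe]
  apply PySem.List.sorted_eq_of_perm_of_pairwise_lt
  · exact (((PySem.List.sorted_perm (PySem.List.enumerate iv2 0) (fun e => e.2.1) false).filter _).symm).map _
  · exact List.pairwise_map.mpr ((PySem.List.pairwise_lt_enumerate iv2 0).filter _)

def pvG (d : PySem.Dict String (List (Int × Int))) (k1 k2 : String) : List ((String × Int) × (String × Int)) :=
  (PySem.List.enumerate (d.getD k1 []) 0).flatMap (fun ie =>
    ((PySem.List.enumerate (d.getD k2 []) 0).filter (fun e => decide (ie.2.1 < e.2.2 ∧ e.2.1 < ie.2.2))).map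
      (fun e => ((k1, ie.1), (k2, e.1))))

theorem pvPairA (d : PySem.Dict String (List (Int × Int))) (k1 k2 : String)
    (acc : List ((String × Int) × (String × Int))) :
    (PySem.List.pyRange 0 (PySem.List.len (d.getD k1 [])) 1).foldl (fun acc i =>
        let p1 := PySem.List.pyGetD (d.getD k1 []) i (0, 0)
        (PySem.List.pyRange 0 (PySem.List.len (d.getD k2 [])) 1).foldl (fun acc j =>
          let p2 := PySem.List.pyGetD (d.getD k2 []) j (0, 0)
          if p1.1 < p2.2 ∧ p2.1 < p1.2 then acc ++ [((k1, i), (k2, j))] else acc) acc) acc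
      = acc ++ pvG d k1 k2 := by
  have hbody : (fun (acc : List ((String × Int) × (String × Int))) (i : Int) =>
        let p1 := PySem.List.pyGetD (d.getD k1 []) i (0, 0)
        (PySem.List.pyRange 0 (PySem.List.len (d.getD k2 [])) 1).foldl (fun acc j =>
          let p2 := PySem.List.pyGetD (d.getD k2 []) j (0, 0)
          if p1.1 < p2.2 ∧ p2.1 < p1.2 then acc ++ [((k1, i), (k2, j))] else acc) acc)
      = (fun acc i => acc ++
          ((PySem.List.enumerate (d.getD k2 []) 0).filter (fun e =>
              decide ((PySem.List.pyGetD (d.getD k1 []) i (0, 0)).1 < e.2.2 ∧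
                e.2.1 < (PySem.List.pyGetD (d.getD k1 []) i (0, 0)).2))).map
            (fun e => ((k1, i), (k2, e.1)))) := by
    funext acc i
    exact pvRowA (d.getD k2 []) _ _ k1 k2 i acc
  rw [hbody, PySem.List.foldl_append_eq_flatMap]
  unfold pvG
  rw [PySem.List.enumerate_eq_map_pyRange (d.getD k1 []) (0, 0), List.flatMap_map]

theorem pvPairB (d : PySem.Dict String (List (Int × Int))) (k1 k2 : String)
    (out : List ((String × Int) × (String × Int))) :
    (PySem.List.enumerate (d.getD k1 []) 0).foldl (fun out ie =>
        let js := PySem.List.sorted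
          (pvScan (PySem.List.sorted (PySem.List.enumerate (d.getD k2 []) 0) (fun e => e.2.1) false)
            ie.2.1 ie.2.2 []) (fun x => x) false
        out ++ js.map (fun j => ((k1, ie.1), (k2, j)))) out
      = out ++ pvG d k1 k2 := by
  have hbody : (fun (out : List ((String × Int) × (String × Int))) (ie : Int × (Int × Int)) =>
        let js := PySem.List.sorted
          (pvScan (PySem.List.sorted (PySem.List.enumerate (d.getD k2 []) 0) (fun e => e.2.1) false)
            ie.2.1 ie.2.2 []) (fun x => x) false
        out ++ js.map (fun j => ((k1, ie.1), (k2, j))))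
      = (fun out ie => out ++
          ((PySem.List.enumerate (d.getD k2 []) 0).filter (fun e =>
              decide (ie.2.1 < e.2.2 ∧ e.2.1 < ie.2.2))).map (fun e => ((k1, ie.1), (k2, e.1)))) := by
    funext out ie
    show out ++ _ = _
    rw [pvRowB (d.getD k2 []) ie.2.1 ie.2.2, List.map_map]
    rfl
  rw [hbody, PySem.List.foldl_append_eq_flatMap]
  rfl

theorem pv_main (td : List (String × List (Int × Int))) :
    find_speech_overlaps td = find_speech_overlaps_alt td := by
  have hA : find_speech_overlaps td
      = [] ++ (PySem.List.pyRange 0 (PySem.List.len (PySem.Dict.mk td).keys - 1) 1).flatMap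
          (fun s1 => (PySem.List.pyRange (s1 + 1) (PySem.List.len (PySem.Dict.mk td).keys) 1).flatMap
            (fun s2 => pvG (PySem.Dict.mk td) (PySem.List.pyGetD (PySem.Dict.mk td).keys s1 "")
              (PySem.List.pyGetD (PySem.Dict.mk td).keys s2 ""))) := by
    simp only [find_speech_overlaps]
    rw [← PySem.List.foldl_append_eq_flatMap]
    apply PySem.List.foldl_congr_mem
    intro acc s1 _
    rw [← PySem.List.foldl_append_eq_flatMap]
    apply PySem.List.foldl_congr_mem
    intro acc2 s2 _
    exact pvPairA (PySem.Dict.mk td) _ _ acc2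
  have hB : find_speech_overlaps_alt td
      = [] ++ (PySem.List.enumerate (PySem.Dict.mk td).keys 0).flatMap
          (fun ak => (PySem.List.slice (PySem.Dict.mk td).keys (some (ak.1 + 1)) none).flatMap
            (pvG (PySem.Dict.mk td) ak.2)) := by
    simp only [find_speech_overlaps_alt]
    rw [← PySem.List.foldl_append_eq_flatMap]
    apply PySem.List.foldl_congr_mem
    intro out ak _
    rw [← PySem.List.foldl_append_eq_flatMap]
    apply PySem.List.foldl_congr_mem
    intro out2 k2 _
    exact pvPairB (PySem.Dict.mk td) _ _ out2
  rw [hA, hB]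
  simp only [List.nil_append]
  rw [PySem.List.enumerate_eq_map_pyRange (PySem.Dict.mk td).keys "", List.flatMap_map]
  rcases Nat.eq_zero_or_pos ((PySem.Dict.mk td).keys.length) with h0 | hpos
  · have hl : PySem.List.len (PySem.Dict.mk td).keys = 0 := by
      simp only [PySem.List.len_eq, h0, Nat.cast_zero]
    rw [hl, PySem.List.pyRange_one_eq_nil (show (0:Int) ≤ 0 by omega),
      PySem.List.pyRange_one_eq_nil (show (0-1:Int) ≤ 0 by omega)]
    rfl
  · have h1 : (1 : Int) ≤ PySem.List.len (PySem.Dict.mk td).keys := by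
      simp only [PySem.List.len_eq]
      omega
    conv_rhs => rw [PySem.List.pyRange_one_append 0 (PySem.List.len (PySem.Dict.mk td).keys - 1)
      (PySem.List.len (PySem.Dict.mk td).keys) (by omega) (by omega)]
    rw [List.flatMap_append]
    have hsing : PySem.List.pyRange (PySem.List.len (PySem.Dict.mk td).keys - 1)
        (PySem.List.len (PySem.Dict.mk td).keys) = [PySem.List.len (PySem.Dict.mk td).keys - 1] := by
      have h := PySem.List.pyRange_one_singleton (PySem.List.len (PySem.Dict.mk td).keys - 1)
      rw [sub_add_cancel] at h
      exact h
    rw [hsing]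
    have hlast : (PySem.List.slice (PySem.Dict.mk td).keys
        (some (PySem.List.len (PySem.Dict.mk td).keys - 1 + 1)) none).flatMap
          (pvG (PySem.Dict.mk td) (PySem.List.pyGetD (PySem.Dict.mk td).keys
            (PySem.List.len (PySem.Dict.mk td).keys - 1) "")) = [] := by
      rw [sub_add_cancel, PySem.List.slice_from _ (by omega)]
      rw [List.drop_eq_nil_iff.mpr (by simp), List.flatMap_nil]
    simp only [List.flatMap_cons, List.flatMap_nil, hlast, List.append_nil]
    apply List.flatMap_congr
    intro s1 hs1
    have h0s : (0 : Int) ≤ s1 := (PySem.List.mem_pyRange_one.mp hs1).1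
    rw [PySem.List.slice_from _ (by omega),
      ← PySem.List.map_pyGetD_pyRange (PySem.Dict.mk td).keys "" (show (0 : Int) ≤ s1 + 1 by omega),
      List.flatMap_map]

-- ===== VERDICT (by name: the statement is the Claim_ definition above) =====
theorem find_speech_overlaps_spec : Claim_equal_find_speech_overlaps := by
  intro td _
  unfold Spec_find_speech_overlaps
  exact pv_main td
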